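-- pv_equiv track=rewrite | github.com/HaxReid/2ALGO | 2ALGO_Algorithmes.py | planter_arbres_top_down
-- ===== SOURCE A (Python) =====
-- def planter_arbres_top_down(n, m, T):
--     memo = {}
--
--     def trouver_essence_minimale(ligne, indice_exclu):
--         if (ligne, indice_exclu) in memo:
--             return memo[(ligne, indice_exclu)]
--
--         min_cout = float('inf')
--         meilleure_essence = -1
--
--         for j in range(m):
--             if j + 1 != indice_exclu and T[ligne][j] < min_cout:
--                 min_cout = T[ligne][j]
--                 meilleure_essence = j + 1
--
--         memo[(ligne, indice_exclu)] = (meilleure_essence, min_cout)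
--         return meilleure_essence, min_cout
--
--     def planter_arbres_recursif_top_down(ligne, indice_exclu, E, C):
--         if ligne >= n:
--             return E, sum(C)
--
--         if (ligne, indice_exclu) in memo:
--             return memo[(ligne, indice_exclu)]
--
--         meilleure_essence, min_cout = trouver_essence_minimale(ligne, indice_exclu)
--         E[ligne] = meilleure_essence
--         C[ligne] = min_cout
--
--         memo[(ligne, indice_exclu)] = planter_arbres_recursif_top_down(ligne + 1, meilleure_essence, E, C)
--         return memo[(ligne, indice_exclu)]
--
--     E = [0] * n
--     C = [0] * n
--
--     return planter_arbres_recursif_top_down(0, -1, E, C)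
-- ===== SOURCE B (Python) =====
-- def planter_arbres_top_down(n, m, T):
--     # Flat greedy loop: one pass over the rows with a running total and the
--     # previous choice carried in `exclu`; no memo, no recursion, no preallocation.
--     E = []
--     total = 0
--     exclu = -1
--     for ligne in range(n):
--         min_c = None
--         best = -1
--         for j in range(m):
--             if j + 1 != exclu and (min_c is None or T[ligne][j] < min_c):
--                 min_c = T[ligne][j]
--                 best = j + 1
--         E.append(best)
--         total += min_c
--         exclu = best
--     return E, total
-- ===== Notes on version B (the rewrite author's own statement) =====
-- stated objective: simpler
-- what changed: Replaced A's recursion with a never-hitting memo dict and in-place mutation of preallocated lists by one flat iterative loop over the rows that appends each choice and keeps a running cost total.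
-- outside the precondition, e.g. on planter_arbres_top_down(2, 1, [[5], [6]]): A returns ([1, -1], inf), B raises TypeError; on planter_arbres_top_down(1, 0, [[]]): A returns ([-1], inf), B raises TypeError; on planter_arbres_top_down(1, 2, [[3]]): A raises IndexError, B raises IndexError
import Mathlib
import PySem

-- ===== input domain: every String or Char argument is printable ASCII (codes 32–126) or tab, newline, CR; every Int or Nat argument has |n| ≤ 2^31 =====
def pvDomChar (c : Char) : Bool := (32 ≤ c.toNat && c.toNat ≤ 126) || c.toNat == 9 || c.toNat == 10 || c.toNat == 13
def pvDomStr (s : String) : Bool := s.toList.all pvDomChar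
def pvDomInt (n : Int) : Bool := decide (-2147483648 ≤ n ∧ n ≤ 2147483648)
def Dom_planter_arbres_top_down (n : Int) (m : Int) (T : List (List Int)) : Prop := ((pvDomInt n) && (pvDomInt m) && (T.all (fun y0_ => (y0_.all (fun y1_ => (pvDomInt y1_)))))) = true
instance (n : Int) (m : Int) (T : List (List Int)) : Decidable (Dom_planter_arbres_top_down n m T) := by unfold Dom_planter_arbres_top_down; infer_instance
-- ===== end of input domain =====

-- B replaces A's recursion-plus-dead-memo and preallocated mutated lists by one flat iterative
-- loop with a running total (objective: simpler); equal return value on Pre_.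


-- ===== PORT A =====
-- T[ligne][j]; both indices are in range on every input Pre_ admits (the getD defaults are never used there)
def pvA_cell (T : List (List Int)) (ligne j : Int) : Int :=
  (PySem.List.pyGet? ((PySem.List.pyGet? T ligne).getD []) j).getD 0

-- float('inf') is modelled as `none` (every int is < inf), so min_cout : Option Int and
-- 'T[ligne][j] < min_cout' is '∀ c ∈ min_cout, … < c'.
-- trouver_essence_minimale: memo check, scan of row `ligne`, store (meilleure, min_cout) (tag .inl)
def pvA_trouver (m : Int) (T : List (List Int)) (ligne exclu : Int)
    (memo : PySem.Dict (Int × Int) (Sum (Int × Option Int) (List Int × Int))) :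
    (Int × Option Int) × PySem.Dict (Int × Int) (Sum (Int × Option Int) (List Int × Int)) :=
  match memo.get? (ligne, exclu) with
  | some (.inl v) => (v, memo)
  | _ =>
    let r := (PySem.List.pyRange 0 m 1).foldl
      (fun (st : Option Int × Int) j =>
        if j + 1 ≠ exclu ∧ (∀ c ∈ st.1, pvA_cell T ligne j < c) then
          (some (pvA_cell T ligne j), j + 1)
        else st)
      (none, -1)
    ((r.2, r.1), memo.insert (ligne, exclu) (.inl (r.2, r.1)))

-- planter_arbres_recursif_top_down; C stores min_cout.getD 0, exact under Pre_ (no inf there)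
def pvA_rec (n m : Int) (T : List (List Int)) (ligne exclu : Int) (E C : List Int)
    (memo : PySem.Dict (Int × Int) (Sum (Int × Option Int) (List Int × Int))) :
    List Int × Int :=
  if n ≤ ligne then (E, C.sum)
  else
    match memo.get? (ligne, exclu) with
    | some (.inr v) => v
    | some (.inl _) => (E, C.sum)  -- unreachable (memo keys always have row index < ligne); Python
                                   -- would return a 2-int tuple here, not a value of the result type
    | none =>
      let t := pvA_trouver m T ligne exclu memo
      let E' := PySem.List.pySetD E ligne t.1.1
      let C' := PySem.List.pySetD C ligne (t.1.2.getD 0)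
      let res := pvA_rec n m T (ligne + 1) t.1.1 E' C' t.2
      let _ := (t.2).insert (ligne, exclu) (.inr res)  -- memo[(ligne, exclu)] = res (then returned)
      res
termination_by (n - ligne).toNat
decreasing_by
  omega

def planter_arbres_top_down (n : Int) (m : Int) (T : List (List Int)) : List Int × Int :=
  let E := List.replicate n.toNat 0
  let C := List.replicate n.toNat 0
  pvA_rec n m T 0 (-1) E C PySem.Dict.empty

-- ===== PORT B =====
def pvB_cell (T : List (List Int)) (ligne j : Int) : Int :=
  (PySem.List.pyGet? ((PySem.List.pyGet? T ligne).getD []) j).getD 0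

-- one flat loop; min_c = None plays inf; 'total += min_c' is exact under Pre_ (min_c is some there)
def planter_arbres_top_down_alt (n : Int) (m : Int) (T : List (List Int)) : List Int × Int :=
  let r := (PySem.List.pyRange 0 n 1).foldl
    (fun (st : List Int × Int × Int) ligne =>
      let s := (PySem.List.pyRange 0 m 1).foldl
        (fun (sc : Option Int × Int) j =>
          if j + 1 ≠ st.2.2 ∧ (∀ c ∈ sc.1, pvB_cell T ligne j < c) then
            (some (pvB_cell T ligne j), j + 1)
          else sc)
        (none, -1)
      (st.1 ++ [s.2], st.2.1 + s.1.getD 0, s.2))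
    ([], 0, -1)
  (r.1, r.2.1)

-- ===== PRECONDITION & SPEC =====
-- Pre_ excludes inputs on which A's result is not a (list of int, int) value: rows missing or
-- shorter than m (IndexError), and inputs where some row scan finds no eligible column (m < 1, or
-- m = 1 with n ≥ 2), on which A returns float('inf') as the cost.
def Pre_planter_arbres_top_down (n : Int) (m : Int) (T : List (List Int)) : Prop :=
  0 < n →
    (n ≤ T.length ∧ 1 ≤ m ∧ (2 ≤ n → 2 ≤ m) ∧
      ∀ row ∈ T.take n.toNat, m ≤ (row.length : Int))
instance (n : Int) (m : Int) (T : List (List Int)) : Decidable (Pre_planter_arbres_top_down n m T) := by unfold Pre_planter_arbres_top_down; infer_instance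

def pvWitness_planter_arbres_top_down : Int × Int × List (List Int) :=
  (3, 2, [[4, 7], [1, 9], [5, 2]])

def Spec_planter_arbres_top_down (n : Int) (m : Int) (T : List (List Int)) (out : List Int × Int) : Prop := out = planter_arbres_top_down_alt n m T
instance (n : Int) (m : Int) (T : List (List Int)) (out : List Int × Int) : Decidable (Spec_planter_arbres_top_down n m T out) := by unfold Spec_planter_arbres_top_down; infer_instance

-- ===== CLAIM (what is proved, stated in full; the proofs are below) =====
def Claim_equal_planter_arbres_top_down : Prop := ∀ (n : Int) (m : Int) (T : List (List Int)), Dom_planter_arbres_top_down n m T → Pre_planter_arbres_top_down n m T → Spec_planter_arbres_top_down n m T (planter_arbres_top_down n m T)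

-- ===== LEMMAS AND PROOFS =====

-- the greedy row scan both ports perform
def pvScan (m : Int) (T : List (List Int)) (ligne exclu : Int) : Option Int × Int :=
  (PySem.List.pyRange 0 m 1).foldl
    (fun (st : Option Int × Int) j =>
      if j + 1 ≠ exclu ∧ (∀ c ∈ st.1, pvA_cell T ligne j < c) then
        (some (pvA_cell T ligne j), j + 1)
      else st)
    (none, -1)

-- the pure greedy recursion: k remaining rows starting at `ligne` with exclusion `exclu`
def pvG (m : Int) (T : List (List Int)) : Nat → Int → Int → List Int × Int
  | 0, _, _ => ([], 0)
  | k + 1, ligne, exclu =>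
    let s := pvScan m T ligne exclu
    let rest := pvG m T k (ligne + 1) s.2
    (s.2 :: rest.1, s.1.getD 0 + rest.2)

theorem pv_take_succ_set (xs : List Int) (l : Nat) (v : Int) (h : l < xs.length) :
    (xs.set l v).take (l + 1) = xs.take l ++ [v] := by
  rw [List.set_eq_take_append_cons_drop, if_pos h, List.take_append]
  simp [List.length_take, Nat.le_of_lt h]

theorem pvA_rec_eq (m : Int) (T : List (List Int)) (k : Nat) :
    ∀ (n ligne exclu : Int) (E C : List Int)
      (memo : PySem.Dict (Int × Int) (Sum (Int × Option Int) (List Int × Int))),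
      0 ≤ ligne → ligne + k = n → E.length = n.toNat → C.length = n.toNat →
      (∀ p ∈ memo.items, p.1.1 < ligne) →
      pvA_rec n m T ligne exclu E C memo =
        (E.take ligne.toNat ++ (pvG m T k ligne exclu).1,
         (C.take ligne.toNat).sum + (pvG m T k ligne exclu).2) := by
  induction k with
  | zero =>
    intro n ligne exclu E C memo h0 hk hE hC hmemo
    have hn : n ≤ ligne := by omega
    rw [pvA_rec, if_pos hn]
    have : ligne.toNat = n.toNat := by omega
    simp [pvG, this, List.take_of_length_le (le_of_eq hE), List.take_of_length_le (le_of_eq hC)]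
  | succ k ih =>
    intro n ligne exclu E C memo h0 hk hE hC hmemo
    have hn : ¬ n ≤ ligne := by omega
    have hget : memo.get? (ligne, exclu) = none := by
      rw [PySem.Dict.get?_eq_none_iff_not_mem_keys]
      intro hmem
      simp only [PySem.Dict.keys, List.mem_map] at hmem
      obtain ⟨p, hp, hfst⟩ := hmem
      have := hmemo p hp
      rw [hfst] at this
      exact absurd this (by simp)
    rw [pvA_rec, if_neg hn, hget]
    dsimp only
    have hlt : ligne.toNat < E.length := by omega
    have hltC : ligne.toNat < C.length := by omega
    set s := pvScan m T ligne exclu with hs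
    have htr : pvA_trouver m T ligne exclu memo
        = ((s.2, s.1), memo.insert (ligne, exclu) (Sum.inl (s.2, s.1))) := by
      rw [pvA_trouver, hget, hs]
      rfl
    rw [htr]
    dsimp only
    rw [ih n (ligne + 1) _ _ _ _ (by omega) (by omega) (by simpa using hE) (by simpa using hC)
      (by
        intro p hp
        rw [PySem.Dict.mem_items_insert] at hp
        rcases hp with rfl | ⟨hp, _⟩
        · simp
        · have := hmemo p hp
          omega)]
    have hto : (ligne + 1).toNat = ligne.toNat + 1 := by omega
    rw [PySem.List.pySetD_of_nonneg E _ h0, PySem.List.pySetD_of_nonneg C _ h0, hto,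
      pv_take_succ_set E ligne.toNat _ hlt, pv_take_succ_set C ligne.toNat _ hltC]
    simp only [pvG, ← hs, List.sum_append, List.sum_cons, List.sum_nil, List.append_assoc,
      List.cons_append, List.nil_append]
    refine Prod.ext rfl ?_
    dsimp only
    ring

theorem pvB_fold_eq (m : Int) (T : List (List Int)) (k : Nat) :
    ∀ (n ligne exclu : Int) (E : List Int) (total : Int),
      ligne + k = n →
      ∃ z,
        (PySem.List.pyRange ligne n 1).foldl
          (fun (st : List Int × Int × Int) ligne =>
            let s := (PySem.List.pyRange 0 m 1).foldl
              (fun (sc : Option Int × Int) j =>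
                if j + 1 ≠ st.2.2 ∧ (∀ c ∈ sc.1, pvB_cell T ligne j < c) then
                  (some (pvB_cell T ligne j), j + 1)
                else sc)
              (none, -1)
            (st.1 ++ [s.2], st.2.1 + s.1.getD 0, s.2))
          (E, total, exclu) =
        (E ++ (pvG m T k ligne exclu).1, total + (pvG m T k ligne exclu).2, z) := by
  induction k with
  | zero =>
    intro n ligne exclu E total hk
    refine ⟨exclu, ?_⟩
    rw [show PySem.List.pyRange ligne n 1 = [] from PySem.List.pyRange_one_eq_nil (by omega)]
    simp [pvG]
  | succ k ih =>
    intro n ligne exclu E total hk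
    rw [show PySem.List.pyRange ligne n 1 = ligne :: PySem.List.pyRange (ligne + 1) n 1 from
      PySem.List.pyRange_one_cons (by omega), List.foldl_cons]
    have hstep : ∀ lg : Int,
        (List.foldl
          (fun (sc : Option Int × Int) j =>
            if j + 1 ≠ exclu ∧ ∀ c ∈ sc.1, pvB_cell T lg j < c then
              (some (pvB_cell T lg j), j + 1)
            else sc)
          (none, -1) (PySem.List.pyRange 0 m 1)) = pvScan m T lg exclu := fun _ => rfl
    dsimp only
    rw [hstep]
    obtain ⟨z, hz⟩ := ih n (ligne + 1) (pvScan m T ligne exclu).2 (E ++ [(pvScan m T ligne exclu).2])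
      (total + (pvScan m T ligne exclu).1.getD 0) (by omega)
    refine ⟨z, ?_⟩
    rw [hz]
    simp only [pvG, List.append_assoc, List.cons_append, List.nil_append]
    refine Prod.ext rfl (Prod.ext ?_ rfl)
    dsimp only
    ring

-- ===== VERDICT (by name: the statement is the Claim_ definition above) =====
theorem planter_arbres_top_down_spec : Claim_equal_planter_arbres_top_down := by
  intro n m T _ _
  unfold Spec_planter_arbres_top_down planter_arbres_top_down planter_arbres_top_down_alt
  by_cases hn : n ≤ 0
  · rw [pvA_rec, if_pos hn,
      show PySem.List.pyRange 0 n 1 = [] from PySem.List.pyRange_one_eq_nil hn]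
    simp [Int.toNat_of_nonpos hn]
  · have h0 : 0 + (n.toNat : Int) = n := by omega
    rw [pvA_rec_eq m T n.toNat n 0 (-1) _ _ _ le_rfl h0 (by simp) (by simp)
      (by intro p hp; simp [PySem.Dict.empty] at hp)]
    obtain ⟨z, hz⟩ := pvB_fold_eq m T n.toNat n 0 (-1) [] 0 h0
    rw [hz]
    simp
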